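-- pv_equiv track=rewrite | github.com/ShivprasadSagare/indic_wikibot | code_of_others/wikidata_extractor/utils.py | is_key_exists
-- ===== SOURCE A (Python) =====
-- def is_key_exists(target, data):
--     #check multiple keys from the list
--     if isinstance(target, list):
--         status = {}
--         for item in target:
--             status[item] = False
--         for item in data:
--             if item in target:
--                 status[item] = True
--         res = True
--         for _, value in status.items():
--             res = res and value
--         return res
--     else:
--     #checks single key
--         for item in data:
--             if target == item:
--                 return True
--     return False
-- ===== SOURCE B (Python) =====
-- def is_key_exists(target, data):
--     # B: single short-circuiting pass over target; membership in data uses == like A.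
--     if isinstance(target, list):
--         return all(item in data for item in target)
--     else:
--         return target in data
-- ===== Notes on version B (the rewrite author's own statement) =====
-- stated objective: simpler
-- what changed: Replaces the status-dict build over target, the marking pass over data and the final AND-reduction with one short-circuiting all(item in data for item in target), iterating over target instead of data.
import Mathlib
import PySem

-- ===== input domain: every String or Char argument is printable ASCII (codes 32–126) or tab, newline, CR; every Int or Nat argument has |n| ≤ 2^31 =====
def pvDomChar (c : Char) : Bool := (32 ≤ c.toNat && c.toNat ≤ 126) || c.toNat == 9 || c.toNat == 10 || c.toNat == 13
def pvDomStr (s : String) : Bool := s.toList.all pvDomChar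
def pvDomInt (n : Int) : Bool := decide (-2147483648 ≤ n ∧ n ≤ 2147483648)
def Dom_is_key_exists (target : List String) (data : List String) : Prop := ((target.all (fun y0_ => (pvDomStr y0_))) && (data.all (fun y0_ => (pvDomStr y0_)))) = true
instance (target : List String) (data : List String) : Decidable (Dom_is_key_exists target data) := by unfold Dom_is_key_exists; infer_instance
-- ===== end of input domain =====

-- B replaces A's two-pass status-dict build and AND-reduction by one short-circuiting
-- pass over target testing membership in data (objective: simpler).

-- ===== PORT A =====
-- target is list[str] here, so only A's list branch is reachable.
def is_key_exists (target : List String) (data : List String) : Bool :=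
  let status : PySem.Dict String Bool :=
    target.foldl (fun d item => d.insert item false) PySem.Dict.empty
  let status :=
    data.foldl (fun d item => if target.contains item then d.insert item true else d) status
  status.items.foldl (fun res p => res && p.2) true

-- ===== PORT B =====
def is_key_exists_alt (target : List String) (data : List String) : Bool :=
  target.all (fun item => data.contains item)

-- ===== PRECONDITION & SPEC =====
def Spec_is_key_exists (target : List String) (data : List String) (out : Bool) : Prop := out = is_key_exists_alt target data
instance (target : List String) (data : List String) (out : Bool) : Decidable (Spec_is_key_exists target data out) := by unfold Spec_is_key_exists; infer_instance

-- ===== CLAIM (what is proved, stated in full; the proofs are below) =====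
def Claim_equal_is_key_exists : Prop := ∀ (target : List String) (data : List String), Dom_is_key_exists target data → Spec_is_key_exists target data (is_key_exists target data)

-- ===== LEMMAS AND PROOFS =====

-- First loop: get? after inserting every target key with value false.
theorem get?_init_loop (target : List String) (d : PySem.Dict String Bool) (k : String) :
    (target.foldl (fun d item => d.insert item false) d).get? k
      = if k ∈ target then some false else d.get? k := by
  induction target generalizing d with
  | nil => simp
  | cons x xs ih =>
    simp only [List.foldl_cons, ih, PySem.Dict.get?_insert, List.mem_cons]
    by_cases hk : k ∈ xs
    · simp [hk]
    · by_cases hx : k = x <;> simp [hk, hx]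

-- Second loop: marks exactly the keys that occur in both target and data.
theorem get?_mark_loop (target data : List String) (d : PySem.Dict String Bool) (k : String) :
    (data.foldl (fun d item => if target.contains item then d.insert item true else d) d).get? k
      = if k ∈ target ∧ k ∈ data then some true else d.get? k := by
  induction data generalizing d with
  | nil => simp
  | cons x xs ih =>
    simp only [List.foldl_cons, ih]
    by_cases hxt : target.contains x
    · simp only [hxt, if_true, PySem.Dict.get?_insert]
      by_cases hk : k = x
      · subst hk
        have hkt : k ∈ target := by simpa using hxt
        by_cases hks : k ∈ xs <;> simp [hkt, hks]
      · by_cases h1 : k ∈ target ∧ k ∈ xs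
        · simp [h1, hk]
        · have h2 : ¬ (k ∈ target ∧ k ∈ x :: xs) := by
            intro ⟨ha, hb⟩
            rcases List.mem_cons.mp hb with hb | hb
            · exact hk hb
            · exact h1 ⟨ha, hb⟩
          simp [h1, hk]
    · simp only [hxt, Bool.false_eq_true, if_false]
      by_cases h1 : k ∈ target ∧ k ∈ xs
      · simp [h1]
      · have h2 : ¬ (k ∈ target ∧ k ∈ x :: xs) := by
          intro ⟨ha, hb⟩
          rcases List.mem_cons.mp hb with hb | hb
          · subst hb; simp at hxt; exact hxt ha
          · exact h1 ⟨ha, hb⟩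
        rw [if_neg h1, if_neg h2]

-- The final reduction is an all over the stored values.
theorem foldl_and_eq_all (l : List (String × Bool)) (b : Bool) :
    l.foldl (fun res p => res && p.2) b = (b && l.all (fun p => p.2)) := by
  induction l generalizing b with
  | nil => simp
  | cons x xs ih => simp [ih, Bool.and_assoc]

-- Keys of the produced dicts.
theorem keys_init_loop (target : List String) :
    (target.foldl (fun d item => d.insert item false) (PySem.Dict.empty : PySem.Dict String Bool)).keys
      = PySem.Set.ofList target := by
  have h := PySem.Dict.keys_foldl_insert (l := target)
      (f := fun (_ : PySem.Dict String Bool) (_ : String) => false) (d := PySem.Dict.empty)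
  simpa [PySem.Dict.keys_empty, PySem.Set.update, PySem.Set.ofList_eq_foldl] using h

theorem keys_mark_loop (target data : List String) (d : PySem.Dict String Bool)
    (hd : ∀ x, x ∈ target → d.contains x = true) :
    (data.foldl (fun d item => if target.contains item then d.insert item true else d) d).keys
      = d.keys := by
  induction data generalizing d with
  | nil => simp
  | cons x xs ih =>
    simp only [List.foldl_cons]
    by_cases hxt : target.contains x
    · have hx : x ∈ target := by simpa using hxt
      rw [if_pos hxt, ih]
      · exact PySem.Dict.keys_insert_of_contains _ _ (hd x hx)
      · intro y hy
        rw [PySem.Dict.contains_insert]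
        simp [hd y hy]
    · rw [if_neg hxt]
      exact ih d hd

theorem nodup_keys_self (target data : List String) :
    ((data.foldl (fun d item => if target.contains item then d.insert item true else d)
        (target.foldl (fun d item => d.insert item false)
          (PySem.Dict.empty : PySem.Dict String Bool))).keys).Nodup := by
  rw [keys_mark_loop, keys_init_loop]
  · exact PySem.Set.nodup_ofList target
  · intro x hx
    rw [PySem.Dict.contains_eq_isSome_get?, get?_init_loop]
    simp [hx]

theorem is_key_exists_eq_alt (target data : List String) :
    is_key_exists target data = is_key_exists_alt target data := by
  unfold is_key_exists is_key_exists_alt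
  set d2 := (data.foldl (fun d item => if target.contains item then d.insert item true else d)
      (target.foldl (fun d item => d.insert item false)
        (PySem.Dict.empty : PySem.Dict String Bool))) with hd2
  rw [foldl_and_eq_all, Bool.true_and]
  have hget : ∀ k, d2.get? k
      = if k ∈ target ∧ k ∈ data then some true
        else if k ∈ target then some false else none := by
    intro k
    rw [hd2, get?_mark_loop, get?_init_loop]
    simp [PySem.Dict.get?_empty]
  have hkeys : d2.keys = PySem.Set.ofList target := by
    rw [hd2, keys_mark_loop, keys_init_loop]
    intro x hx
    rw [PySem.Dict.contains_eq_isSome_get?, get?_init_loop]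
    simp [hx]
  have hnodup := nodup_keys_self target data
  rw [← hd2] at hnodup
  apply Bool.eq_iff_iff.mpr
  simp only [List.all_eq_true]
  constructor
  · intro h k hk
    by_cases hkd : k ∈ data
    · simpa using List.contains_iff_mem.mpr hkd
    · exfalso
      have hs : d2.get? k = some false := by rw [hget]; simp [hk, hkd]
      have hmem : (k, false) ∈ d2.items :=
        PySem.Dict.mem_items_of_get?_eq_some _ hs
      have := h (k, false) hmem
      simp at this
  · intro h p hp
    have hs := PySem.Dict.get?_of_mem_items _ hp hnodup
    rw [hget] at hs
    by_cases h1 : p.1 ∈ target ∧ p.1 ∈ data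
    · simp [h1] at hs; simp [hs]
    · by_cases h2 : p.1 ∈ target
      · have hkd : p.1 ∈ data := by
          have := h p.1 h2
          simpa [List.contains_iff_mem] using this
        exact absurd ⟨h2, hkd⟩ h1
      · simp [h2] at hs

-- ===== VERDICT (by name: the statement is the Claim_ definition above) =====
theorem is_key_exists_spec : Claim_equal_is_key_exists := by
  intro target data _
  exact is_key_exists_eq_alt target data
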